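-- pv_equiv track=rewrite | github.com/morphic-bio/process_features | scripts/offset_sweep.py | sweep_offsets
-- ===== SOURCE A (Python) =====
-- PROBE_LEN = 8
--
-- def sweep_offsets(seq_iter, kmers, center, window):
--     results = {}
--     offs = range(center - window, center + window + 1)
--     seqs = list(seq_iter)
--     total = len(seqs)
--     for off in offs:
--         if off < 0:
--             results[off] = (0, total)
--             continue
--         matched = 0
--         for s in seqs:
--             if len(s) >= off + PROBE_LEN:
--                 k = s[off:off+PROBE_LEN]
--                 if k in kmers:
--                     matched += 1
--         results[off] = (matched, total)
--     return results
-- ===== SOURCE B (Python) =====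
-- PROBE_LEN = 8
--
-- def sweep_offsets(seq_iter, kmers, center, window):
--     seqs = list(seq_iter)
--     total = len(seqs)
--     lo = center - window
--     hi = center + window
--     start = max(0, lo)
--     counts = {}
--     for s in seqs:
--         stop = min(hi + 1, len(s) - PROBE_LEN + 1)
--         for off in range(start, stop):
--             if s[off:off + PROBE_LEN] in kmers:
--                 counts[off] = counts.get(off, 0) + 1
--     results = {}
--     for off in range(lo, hi + 1):
--         results[off] = (0, total) if off < 0 else (counts.get(off, 0), total)
--     return results
-- ===== Notes on version B (the rewrite author's own statement) =====
-- stated objective: faster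
-- what changed: Loops once over the sequences (outer) instead of once per offset, maintaining a per-offset counter dict whose inner range is clipped to each sequence's feasible offsets (min(hi+1, len(s)-PROBE_LEN+1)), then assembles the result in a separate pass over the full offset range.
import Mathlib
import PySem

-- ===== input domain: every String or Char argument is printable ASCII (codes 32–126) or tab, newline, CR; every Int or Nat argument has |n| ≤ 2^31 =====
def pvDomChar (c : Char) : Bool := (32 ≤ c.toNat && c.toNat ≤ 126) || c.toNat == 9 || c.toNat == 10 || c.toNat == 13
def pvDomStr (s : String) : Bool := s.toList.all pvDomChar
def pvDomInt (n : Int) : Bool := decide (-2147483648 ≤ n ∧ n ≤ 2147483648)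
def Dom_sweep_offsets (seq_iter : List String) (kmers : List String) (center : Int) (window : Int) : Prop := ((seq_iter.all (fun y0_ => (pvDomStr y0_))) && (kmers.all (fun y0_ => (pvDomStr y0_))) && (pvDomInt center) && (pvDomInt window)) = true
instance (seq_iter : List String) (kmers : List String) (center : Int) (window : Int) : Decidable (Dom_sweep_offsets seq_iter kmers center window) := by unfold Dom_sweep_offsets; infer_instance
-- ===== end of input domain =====

-- B swaps the loop nest: one outer pass over the sequences maintaining a per-offset counter dict
-- (inner offset range clipped per sequence), then a separate assembly pass over the offset range.

-- ===== PORT A =====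
def sweep_offsets (seq_iter : List String) (kmers : List String) (center : Int) (window : Int) : List (Int × Int × Int) :=
  let offs := PySem.List.pyRange (center - window) (center + window + 1) 1
  let seqs := seq_iter
  let total : Int := (seqs.length : Int)
  let results : PySem.Dict Int (Int × Int) :=
    offs.foldl (fun d off =>
      if off < 0 then d.insert off (0, total)
      else
        let matched : Int := seqs.foldl (fun m s =>
          if off + 8 ≤ PySem.Str.len s then
            let k := PySem.Str.slice s (some off) (some (off + 8))
            if k ∈ kmers then m + 1 else m
          else m) 0
        d.insert off (matched, total)) PySem.Dict.empty
  results.items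

-- ===== PORT B =====
def sweep_offsets_alt (seq_iter : List String) (kmers : List String) (center : Int) (window : Int) : List (Int × Int × Int) :=
  let seqs := seq_iter
  let total : Int := (seqs.length : Int)
  let lo := center - window
  let hi := center + window
  let start := max 0 lo
  let counts : PySem.Dict Int Int :=
    seqs.foldl (fun counts s =>
      let stop := min (hi + 1) (PySem.Str.len s - 8 + 1)
      (PySem.List.pyRange start stop 1).foldl (fun c off =>
        if PySem.Str.slice s (some off) (some (off + 8)) ∈ kmers then
          c.insert off (c.getD off 0 + 1)
        else c) counts) PySem.Dict.empty
  let results : PySem.Dict Int (Int × Int) :=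
    (PySem.List.pyRange lo (hi + 1) 1).foldl (fun d off =>
      d.insert off (if off < 0 then ((0 : Int), total) else (counts.getD off 0, total)))
      PySem.Dict.empty
  results.items

-- ===== PRECONDITION & SPEC =====
def Spec_sweep_offsets (seq_iter : List String) (kmers : List String) (center : Int) (window : Int) (out : List (Int × Int × Int)) : Prop := out = sweep_offsets_alt seq_iter kmers center window
instance (seq_iter : List String) (kmers : List String) (center : Int) (window : Int) (out : List (Int × Int × Int)) : Decidable (Spec_sweep_offsets seq_iter kmers center window out) := by unfold Spec_sweep_offsets; infer_instance

-- ===== CLAIM (what is proved, stated in full; the proofs are below) =====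
def Claim_equal_sweep_offsets : Prop := ∀ (seq_iter : List String) (kmers : List String) (center : Int) (window : Int), Dom_sweep_offsets seq_iter kmers center window → Spec_sweep_offsets seq_iter kmers center window (sweep_offsets seq_iter kmers center window)

-- ===== LEMMAS AND PROOFS =====

-- a fold inserting fresh distinct keys into an empty dict appends its items in order
theorem items_foldl_insert_id {ν : Type} (l : List Int) (v : Int → ν) (hnd : l.Nodup) :
    (l.foldl (fun d off => d.insert off (v off)) (PySem.Dict.empty : PySem.Dict Int ν)).items
      = l.map (fun off => (off, v off)) := by
  have h := PySem.Dict.items_foldl_insert_fresh (l := l) (k := id) (v := v)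
    (d := (PySem.Dict.empty : PySem.Dict Int ν))
    (fun a _ => PySem.Dict.contains_empty _) (by simpa using hnd)
  simpa using h

-- B's inner loop over a duplicate-free offset list adds 1 at key x iff x is in the list and satisfies the condition.
theorem getD_inner_fold (offs : List Int) (cond : Int → Bool) (d : PySem.Dict Int Int)
    (hnd : offs.Nodup) (x : Int) :
    ((offs.foldl (fun c off => if cond off then c.insert off (c.getD off 0 + 1) else c) d).getD x 0)
      = d.getD x 0 + (if x ∈ offs ∧ cond x then 1 else 0) := by
  induction offs generalizing d with
  | nil => simp
  | cons a t ih =>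
    simp only [List.nodup_cons] at hnd
    simp only [List.foldl_cons]
    rw [ih _ hnd.2]
    by_cases hxa : x = a
    · subst hxa
      have hxt : x ∉ t := hnd.1
      by_cases hc : cond x
      · simp [hc, hxt, PySem.Dict.getD_insert_self]
      · simp [hc, hxt]
    · by_cases hc : cond a
      · simp [hc, PySem.Dict.getD_insert, hxa]
      · simp [hc, hxa]

-- B's outer pass: the counter's value at x counts the sequences whose (clipped) inner range hits x.
theorem getD_outer_fold (seqs : List String) (cond : String → Int → Bool)
    (start : Int) (stop : String → Int) (d : PySem.Dict Int Int) (x : Int) :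
    ((seqs.foldl (fun c s =>
        (PySem.List.pyRange start (stop s) 1).foldl
          (fun c off => if cond s off then c.insert off (c.getD off 0 + 1) else c) c) d).getD x 0)
      = d.getD x 0 + (seqs.countP (fun s => decide (x ∈ PySem.List.pyRange start (stop s) 1) && cond s x)) := by
  induction seqs generalizing d with
  | nil => simp
  | cons s t ih =>
    simp only [List.foldl_cons]
    rw [ih, getD_inner_fold _ _ _ (PySem.List.nodup_pyRange_one _ _) x]
    simp only [List.countP_cons]
    by_cases hm : x ∈ PySem.List.pyRange start (stop s) 1 ∧ cond s x
    · simp [hm.1, hm.2]; omega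
    · rw [if_neg hm]
      rcases Decidable.not_and_iff_not_or_not.mp hm with h | h <;> simp [h]

-- A's matched loop is a countP.
theorem foldl_if_add_countP (p : String → Bool) (seqs : List String) (n : Int) :
    seqs.foldl (fun m s => if p s then m + 1 else m) n = n + (seqs.countP p : Int) := by
  induction seqs generalizing n with
  | nil => simp
  | cons s t ih =>
    simp only [List.foldl_cons, List.countP_cons]
    by_cases hp : p s <;> simp [hp, ih] <;> omega

theorem sweep_offsets_spec : Claim_equal_sweep_offsets := by
  unfold Claim_equal_sweep_offsets Spec_sweep_offsets
  intro seqs kmers center window _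
  unfold sweep_offsets sweep_offsets_alt
  simp only []
  set total : Int := (seqs.length : Int) with htotal
  set lo := center - window with hlo
  set hi := center + window with hhi
  have hrange : center + window + 1 = hi + 1 := rfl
  rw [hrange]
  set offs := PySem.List.pyRange lo (hi + 1) 1 with hoffs
  have hnd : offs.Nodup := PySem.List.nodup_pyRange_one _ _
  -- the two assembled dicts, as maps over offs
  have hA :
      (offs.foldl (fun (d : PySem.Dict Int (Int × Int)) off =>
        if off < 0 then d.insert off (0, total)
        else d.insert off
          (seqs.foldl (fun m s =>
            if off + 8 ≤ PySem.Str.len s then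
              if PySem.Str.slice s (some off) (some (off + 8)) ∈ kmers then m + 1 else m
            else m) 0, total)) PySem.Dict.empty).items
      = offs.map (fun off => (off,
          if off < 0 then ((0 : Int), total)
          else (seqs.foldl (fun m s =>
            if off + 8 ≤ PySem.Str.len s then
              if PySem.Str.slice s (some off) (some (off + 8)) ∈ kmers then m + 1 else m
            else m) 0, total))) := by
    have hbody : (fun (d : PySem.Dict Int (Int × Int)) off =>
        if off < 0 then d.insert off (0, total)
        else d.insert off
          (seqs.foldl (fun m s =>
            if off + 8 ≤ PySem.Str.len s then
              if PySem.Str.slice s (some off) (some (off + 8)) ∈ kmers then m + 1 else m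
            else m) 0, total))
        = (fun (d : PySem.Dict Int (Int × Int)) off => d.insert off
          (if off < 0 then ((0 : Int), total)
           else (seqs.foldl (fun m s =>
            if off + 8 ≤ PySem.Str.len s then
              if PySem.Str.slice s (some off) (some (off + 8)) ∈ kmers then m + 1 else m
            else m) 0, total))) := by
      funext d off; by_cases h : off < 0 <;> simp [h]
    rw [hbody]
    rw [items_foldl_insert_id _ _ hnd]
  have hB :
      ((PySem.List.pyRange lo (hi + 1) 1).foldl (fun (d : PySem.Dict Int (Int × Int)) off =>
        d.insert off (if off < 0 then ((0 : Int), total)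
          else ((seqs.foldl (fun counts s =>
            (PySem.List.pyRange (max 0 lo) (min (hi + 1) (PySem.Str.len s - 8 + 1)) 1).foldl
              (fun c off => if PySem.Str.slice s (some off) (some (off + 8)) ∈ kmers then
                c.insert off (c.getD off 0 + 1) else c) counts) PySem.Dict.empty).getD off 0, total)))
        PySem.Dict.empty).items
      = offs.map (fun off => (off,
          if off < 0 then ((0 : Int), total)
          else ((seqs.foldl (fun counts s =>
            (PySem.List.pyRange (max 0 lo) (min (hi + 1) (PySem.Str.len s - 8 + 1)) 1).foldl
              (fun c off => if PySem.Str.slice s (some off) (some (off + 8)) ∈ kmers then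
                c.insert off (c.getD off 0 + 1) else c) counts) PySem.Dict.empty).getD off 0, total))) := by
    rw [← hoffs]
    rw [items_foldl_insert_id _ _ hnd]
  rw [hA, hB]
  apply List.map_congr_left
  intro off hoff
  have hmem := (PySem.List.mem_pyRange_one.mp (hoffs ▸ hoff))
  by_cases hneg : off < 0
  · simp [hneg]
  · simp only [if_neg hneg]
    refine Prod.ext rfl (Prod.ext ?_ rfl)
    simp only []
    have houter := getD_outer_fold seqs
        (fun s off => decide (PySem.Str.slice s (some off) (some (off + 8)) ∈ kmers))
        (max 0 lo) (fun s => min (hi + 1) (PySem.Str.len s - 8 + 1)) PySem.Dict.empty off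
    simp only [decide_eq_true_eq] at houter
    rw [houter]
    have hfun : (fun (m : Int) (s : String) =>
        if off + 8 ≤ PySem.Str.len s then
          if PySem.Str.slice s (some off) (some (off + 8)) ∈ kmers then m + 1 else m
        else m)
      = (fun (m : Int) (s : String) =>
        if (decide (off + 8 ≤ PySem.Str.len s)
            && decide (PySem.Str.slice s (some off) (some (off + 8)) ∈ kmers)) = true
        then m + 1 else m) := by
      funext m s
      simp only [Bool.and_eq_true, decide_eq_true_eq]
      split_ifs <;> first | rfl | tauto
    rw [hfun, foldl_if_add_countP]
    simp only [PySem.Dict.getD_empty, zero_add]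
    congr 1
    apply List.countP_congr
    intro s _
    simp only [PySem.List.mem_pyRange_one, Bool.and_eq_true, decide_eq_true_eq]
    constructor
    · rintro ⟨h1, h2⟩; exact ⟨⟨by omega, by omega⟩, h2⟩
    · rintro ⟨⟨h1, h2⟩, h3⟩; exact ⟨by omega, h3⟩
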